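-- pv_equiv track=rewrite | github.com/EmadNama/Python | Semester2-Oct24-Feb25/Functions/Practice Running Time.py | twolists
-- ===== SOURCE A (Python) =====
-- def twolists(list1, list2):
--     dict = {}
--     pst = []
--     for i in list1:
--         if i not in dict:
--             dict[i] = 0
--         dict[i] += 1
--     for i in list2:
--         if i in dict:
--             dict[i] += 1
--     for key, val in dict.items():
--         if val >= 2:
--             pst.append(key)
--     return pst
-- ===== SOURCE B (Python) =====
-- def twolists(list1, list2):
--     # Position-based selection: an item of list1 is kept iff its first and last
--     # positions in list1 differ (it occurs at least twice) or it occurs in list2.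
--     first = {}
--     last = {}
--     for i, x in enumerate(list1):
--         if x not in first:
--             first[x] = i
--         last[x] = i
--     s2 = set(list2)
--     return [x for x, i in first.items() if i != last[x] or x in s2]
-- ===== Notes on version B (the rewrite author's own statement) =====
-- stated objective: alternative
-- what changed: B selects by positions instead of counts: one enumerate pass records each item's first and last index in list1, and an item is kept iff those indices differ or it is in set(list2), eliminating A's second accumulation loop over list2 and the summed count test.
import Mathlib
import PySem

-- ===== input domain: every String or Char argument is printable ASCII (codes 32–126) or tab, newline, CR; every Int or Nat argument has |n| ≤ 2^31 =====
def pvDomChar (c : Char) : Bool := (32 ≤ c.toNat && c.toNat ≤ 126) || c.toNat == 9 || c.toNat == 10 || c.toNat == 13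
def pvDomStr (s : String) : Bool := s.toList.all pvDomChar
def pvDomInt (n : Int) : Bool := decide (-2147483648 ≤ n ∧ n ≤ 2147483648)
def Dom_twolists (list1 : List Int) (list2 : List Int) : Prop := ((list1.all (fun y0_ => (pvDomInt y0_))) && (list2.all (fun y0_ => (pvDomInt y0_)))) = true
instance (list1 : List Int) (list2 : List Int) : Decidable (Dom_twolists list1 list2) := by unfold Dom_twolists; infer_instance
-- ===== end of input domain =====

-- B (alternative): selects by positions instead of counts — one enumerate pass records each
-- item's first and last index in list1; an item is kept iff those indices differ or it is in set(list2).

-- ===== PORT A =====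
-- loop body of A's first loop: if i not in dict: dict[i] = 0; dict[i] += 1
def twolistsStep1 (d : PySem.Dict Int Int) (i : Int) : PySem.Dict Int Int :=
  let d := if d.contains i = false then d.insert i 0 else d
  d.insert i (d.getD i 0 + 1)

-- loop body of A's second loop: if i in dict: dict[i] += 1
def twolistsStep2 (d : PySem.Dict Int Int) (i : Int) : PySem.Dict Int Int :=
  if d.contains i = true then d.insert i (d.getD i 0 + 1) else d

def twolists (list1 : List Int) (list2 : List Int) : List Int :=
  let d := list1.foldl twolistsStep1 PySem.Dict.empty
  let d := list2.foldl twolistsStep2 d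
  -- pst = []; for key, val in dict.items(): if val >= 2: pst.append(key)
  d.items.foldl (fun pst kv => if kv.2 ≥ 2 then pst ++ [kv.1] else pst) []

-- ===== PORT B =====
-- loop body of B's single loop over enumerate(list1): if x not in first: first[x] = i;  last[x] = i
def twolistsStepB (p : PySem.Dict Int Int × PySem.Dict Int Int) (ix : Int × Int) :
    PySem.Dict Int Int × PySem.Dict Int Int :=
  ((if p.1.contains ix.2 = false then p.1.insert ix.2 ix.1 else p.1), p.2.insert ix.2 ix.1)

def twolists_alt (list1 : List Int) (list2 : List Int) : List Int :=
  let fl := (PySem.List.enumerate list1).foldl twolistsStepB (PySem.Dict.empty, PySem.Dict.empty)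
  let s2 := PySem.Set.ofList list2
  -- [x for x, i in first.items() if i != last[x] or x in s2]
  -- last[x]: every key of first is a key of last, so the lookup never raises; getD _ 0 is exact here
  ((fl.1.items.filter (fun kv => decide (kv.2 ≠ fl.2.getD kv.1 0) || s2.contains kv.1)).map (·.1))

-- ===== PRECONDITION & SPEC =====
def Spec_twolists (list1 : List Int) (list2 : List Int) (out : List Int) : Prop := out = twolists_alt list1 list2
instance (list1 : List Int) (list2 : List Int) (out : List Int) : Decidable (Spec_twolists list1 list2 out) := by unfold Spec_twolists; infer_instance

-- ===== CLAIM (what is proved, stated in full; the proofs are below) =====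
def Claim_equal_twolists : Prop := ∀ (list1 : List Int) (list2 : List Int), Dom_twolists list1 list2 → Spec_twolists list1 list2 (twolists list1 list2)

-- ===== LEMMAS AND PROOFS =====

-- the canonical value both programs compute: the distinct items of list1 in first-appearance
-- order, kept iff they occur twice in list1 or occur in list2
def twolistsCanon (list1 : List Int) (list2 : List Int) : List Int :=
  (PySem.Set.ofList list1).filter
    (fun k => decide (2 ≤ list1.count k) || (PySem.Set.ofList list2).contains k)

-- ---- A side ----

-- A's first loop (setdefault-0-then-increment) computes the same dict as the plain counting loop.
theorem loop1_eq (list1 : List Int) (d0 : PySem.Dict Int Int) :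
    list1.foldl twolistsStep1 d0
    = list1.foldl (fun d x => d.insert x (d.getD x 0 + 1)) d0 := by
  induction list1 generalizing d0 with
  | nil => rfl
  | cons i l ih =>
    simp only [List.foldl_cons]
    rw [ih]
    congr 1
    unfold twolistsStep1
    by_cases h : d0.contains i = true
    · simp [h]
    · simp only [Bool.not_eq_true] at h
      simp [h, PySem.Dict.getD_insert_self, PySem.Dict.insert_insert_self,
        PySem.Dict.getD_of_not_contains d0 0 h]

-- A's second loop (increment existing keys only) preserves the key list.
theorem loop2_keys (list2 : List Int) (d : PySem.Dict Int Int) :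
    (list2.foldl twolistsStep2 d).keys = d.keys := by
  induction list2 generalizing d with
  | nil => rfl
  | cons i l ih =>
    simp only [List.foldl_cons]
    rw [ih]
    unfold twolistsStep2
    by_cases h : d.contains i = true
    · rw [if_pos h, PySem.Dict.keys_insert_of_contains d _ h]
    · rw [if_neg h]

-- A's second loop adds list2's multiplicity to the value at each existing key.
theorem loop2_getD (list2 : List Int) (d : PySem.Dict Int Int) (k : Int)
    (hk : d.contains k = true) :
    (list2.foldl twolistsStep2 d).getD k 0 = d.getD k 0 + list2.count k := by
  induction list2 generalizing d with
  | nil => simp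
  | cons i l ih =>
    simp only [List.foldl_cons, List.count_cons]
    by_cases h : d.contains i = true
    · rw [show twolistsStep2 d i = d.insert i (d.getD i 0 + 1) from if_pos h,
        ih _ (by simp [PySem.Dict.contains_insert, hk]), PySem.Dict.getD_insert]
      by_cases hki : k = i
      · subst hki; simp; ring
      · have hik : ¬ i = k := fun e => hki (Eq.symm e)
        simp [hki, hik]
    · rw [show twolistsStep2 d i = d from if_neg h, ih _ hk]
      have hik : ¬ i = k := fun e => h (e ▸ hk)
      simp [hik]

theorem twolists_eq_canon (list1 list2 : List Int) :
    twolists list1 list2 = twolistsCanon list1 list2 := by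
  simp only [twolists, twolistsCanon]
  rw [loop1_eq, PySem.Dict.foldl_insert_getD_add_one_eq_counter]
  have hkeys : (list2.foldl twolistsStep2 (PySem.Dict.counter list1)).keys
      = (PySem.Dict.counter list1 : PySem.Dict Int Int).keys := loop2_keys list2 _
  have hnd : (list2.foldl twolistsStep2 (PySem.Dict.counter list1)).keys.Nodup := by
    rw [hkeys]; exact PySem.Dict.nodup_keys_counter list1
  have hb : (fun (pst : List Int) (kv : Int × Int) => if kv.2 ≥ 2 then pst ++ [kv.1] else pst)
      = (fun pst kv => if decide (kv.2 ≥ 2) = true then pst ++ [kv.1] else pst) := by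
    funext pst kv
    by_cases h : kv.2 ≥ 2 <;> simp [h]
  rw [hb, PySem.List.foldl_append_if (fun kv : Int × Int => decide (kv.2 ≥ 2)) (fun kv : Int × Int => kv.1),
    PySem.Dict.items_eq_map_keys _ hnd 0, List.nil_append, List.filter_map, List.map_map,
    hkeys, PySem.Dict.keys_counter]
  simp only [Function.comp_def]
  rw [show (fun k : Int => ((k, (List.foldl twolistsStep2 (PySem.Dict.counter list1) list2).getD k 0) : Int × Int).1) = (fun k : Int => k) from rfl,
    List.map_id']
  apply List.filter_congr
  intro k hk
  have hmem : k ∈ list1 := (PySem.Set.mem_ofList list1 k).1 hk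
  have hcont : (PySem.Dict.counter list1 : PySem.Dict Int Int).contains k = true := by
    rw [PySem.Dict.contains_counter]
    exact (List.contains_iff_mem).2 hmem
  simp only [loop2_getD list2 _ k hcont, PySem.Dict.getD_counter]
  have h1 : 1 ≤ list1.count k := List.count_pos_iff.2 hmem
  rw [Bool.eq_iff_iff]
  simp only [Bool.or_eq_true, decide_eq_true_eq, ge_iff_le]
  by_cases h2 : k ∈ list2
  · have hc2 : 1 ≤ list2.count k := List.count_pos_iff.2 h2
    have hs2 : (PySem.Set.ofList list2).contains k = true := by
      simp [PySem.Set.contains, PySem.Set.mem_ofList, h2]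
    simp only [hs2, or_true, iff_true]
    omega
  · have hc2 : list2.count k = 0 := List.count_eq_zero.2 h2
    have hs2 : (PySem.Set.ofList list2).contains k = false := by
      simp [PySem.Set.contains, PySem.Set.mem_ofList, h2]
    simp only [hs2, Bool.false_eq_true, or_false, hc2]
    omega

-- ---- B side ----

-- the index of the last occurrence of k in l (none if absent): the reference value for B's 'last' dict
def lastOcc : List Int → Int → Option Nat
  | [], _ => none
  | x :: r, k =>
    match lastOcc r k with
    | some j => some (j + 1)
    | none => if x = k then some 0 else none

theorem lastOcc_eq_none_iff (l : List Int) (k : Int) : lastOcc l k = none ↔ k ∉ l := by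
  induction l with
  | nil => simp [lastOcc]
  | cons x r ih =>
    simp only [lastOcc, List.mem_cons]
    cases h : lastOcc r k with
    | some j =>
      have : k ∈ r := by
        by_contra hnm
        rw [ih.2 hnm] at h
        exact absurd h (by simp)
      simp [this]
    | none =>
      by_cases hx : x = k
      · simp [hx]
      · simp [hx, Ne.symm hx, ih.1 h]

-- first index ≠ last index exactly when k occurs at least twice
theorem first_last_count (l : List Int) (k : Int) (j : Nat) (h : lastOcc l k = some j) :
    (l.idxOf k ≠ j) ↔ 2 ≤ l.count k := by
  induction l generalizing j with
  | nil => simp [lastOcc] at h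
  | cons x r ih =>
    by_cases hx : x = k
    · subst hx
      simp only [List.idxOf_cons_self, List.count_cons_self]
      cases hr : lastOcc r x with
      | some j' =>
        simp only [lastOcc, hr, Option.some.injEq] at h
        have hmem : x ∈ r := by
          by_contra hnm
          rw [(lastOcc_eq_none_iff r x).2 hnm] at hr
          exact absurd hr (by simp)
        have : 1 ≤ r.count x := List.count_pos_iff.2 hmem
        omega
      | none =>
        simp only [lastOcc, hr] at h
        simp at h
        have hnm : x ∉ r := (lastOcc_eq_none_iff r x).1 hr
        have : r.count x = 0 := List.count_eq_zero.2 hnm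
        omega
    · cases hr : lastOcc r k with
      | some j' =>
        simp only [lastOcc, hr, Option.some.injEq] at h
        rw [List.idxOf_cons_ne _ (by exact hx)]
        have hc : (x :: r).count k = r.count k := by
          simp [hx]
        rw [hc]
        have := ih j' hr
        omega
      | none =>
        simp only [lastOcc, hr, if_neg hx] at h
        exact absurd h (by simp)

-- B's 'first' dict: its key list is the distinct items of list1 in order (over any pair list)
theorem keys_firstFold (ps : List (Int × Int)) (d : PySem.Dict Int Int) :
    (ps.foldl (fun d (ix : Int × Int) => if d.contains ix.2 = false then d.insert ix.2 ix.1 else d) d).keys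
      = PySem.Set.update d.keys (ps.map (·.2)) := by
  induction ps generalizing d with
  | nil => simp [PySem.Set.update]
  | cons p ps ih =>
    simp only [List.foldl_cons, List.map_cons, PySem.Set.update, List.foldl_cons]
    rw [ih]
    simp only [PySem.Set.update]
    congr 1
    by_cases h : d.contains p.2 = true
    · rw [if_neg (by simp [h]), PySem.Set.add,
        if_pos (by simpa [PySem.Set.contains, PySem.Dict.contains_iff_mem_keys] using h)]
    · have h' : d.contains p.2 = false := by simpa using h
      rw [if_pos h', PySem.Dict.keys_insert_of_not_contains d _ h', PySem.Set.add,
        if_neg (by simpa [PySem.Set.contains, PySem.Dict.contains_iff_mem_keys] using h)]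

-- B's 'first' dict never changes the value at a key it already holds
theorem getD_firstFold_stable (ps : List (Int × Int)) (d : PySem.Dict Int Int) (k : Int)
    (hk : d.contains k = true) :
    ((ps.foldl (fun d (ix : Int × Int) => if d.contains ix.2 = false then d.insert ix.2 ix.1 else d) d).getD k 0)
      = d.getD k 0 := by
  induction ps generalizing d with
  | nil => rfl
  | cons p ps ih =>
    simp only [List.foldl_cons]
    by_cases h : d.contains p.2 = false
    · have hne : ¬ k = p.2 := fun e => by rw [e] at hk; rw [hk] at h; exact absurd h (by simp)
      rw [if_pos h, ih _ (by simp [PySem.Dict.contains_insert, hk]), PySem.Dict.getD_insert, if_neg hne]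
    · rw [if_neg h, ih _ hk]

-- B's 'first' dict holds the index of k's FIRST occurrence
theorem getD_firstFold (l : List Int) (s : Int) (d : PySem.Dict Int Int) (k : Int)
    (hd : d.contains k = false) (hk : k ∈ l) :
    (((PySem.List.enumerate l s).foldl (fun d (ix : Int × Int) => if d.contains ix.2 = false then d.insert ix.2 ix.1 else d) d).getD k 0)
      = s + (l.idxOf k : Int) := by
  induction l generalizing s d with
  | nil => simp at hk
  | cons x r ih =>
    rw [PySem.List.enumerate_cons]
    simp only [List.foldl_cons]
    by_cases hx : x = k
    · subst hx
      rw [if_pos hd, getD_firstFold_stable _ _ _ (by simp [PySem.Dict.contains_insert_self]),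
        PySem.Dict.getD_insert_self]
      simp
    · have hk' : k ∈ r := by cases List.mem_cons.1 hk with
        | inl e => exact absurd e.symm hx
        | inr h => exact h
      have step : (if d.contains x = false then d.insert x s else d).contains k = false := by
        by_cases h : d.contains x = false
        · rw [if_pos h, PySem.Dict.contains_insert]
          simp [hd, Ne.symm hx]
        · rw [if_neg h]; exact hd
      rw [ih (s + 1) _ step hk', List.idxOf_cons_ne _ (by exact hx)]
      push_cast
      ring

-- B's 'last' dict holds the index of k's LAST occurrence
theorem getD_lastFold (l : List Int) (s : Int) (d : PySem.Dict Int Int) (k : Int) :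
    (((PySem.List.enumerate l s).foldl (fun d (ix : Int × Int) => d.insert ix.2 ix.1) d).getD k 0)
      = match lastOcc l k with
        | some j => s + (j : Int)
        | none => d.getD k 0 := by
  induction l generalizing s d with
  | nil => simp [lastOcc]
  | cons x r ih =>
    rw [PySem.List.enumerate_cons]
    simp only [List.foldl_cons]
    rw [ih (s + 1) (d.insert x s)]
    cases hr : lastOcc r k with
    | some j => simp only [lastOcc, hr]; push_cast; ring
    | none =>
      simp only [lastOcc, hr, PySem.Dict.getD_insert]
      by_cases hx : x = k
      · simp [hx]
      · rw [if_neg (show ¬k = x from fun e => hx (Eq.symm e)), if_neg hx]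

-- the two dicts of B's paired fold evolve independently
theorem stepB_fst (ps : List (Int × Int)) (d1 d2 : PySem.Dict Int Int) :
    (ps.foldl twolistsStepB (d1, d2)).1
      = ps.foldl (fun d (ix : Int × Int) => if d.contains ix.2 = false then d.insert ix.2 ix.1 else d) d1 := by
  induction ps generalizing d1 d2 with
  | nil => rfl
  | cons p ps ih => simp only [List.foldl_cons, twolistsStepB]; exact ih _ _

theorem stepB_snd (ps : List (Int × Int)) (d1 d2 : PySem.Dict Int Int) :
    (ps.foldl twolistsStepB (d1, d2)).2
      = ps.foldl (fun d (ix : Int × Int) => d.insert ix.2 ix.1) d2 := by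
  induction ps generalizing d1 d2 with
  | nil => rfl
  | cons p ps ih => simp only [List.foldl_cons, twolistsStepB]; exact ih _ _

theorem twolists_alt_eq_canon (list1 list2 : List Int) :
    twolists_alt list1 list2 = twolistsCanon list1 list2 := by
  simp only [twolists_alt, twolistsCanon]
  rw [stepB_fst, stepB_snd]
  have hkeys : ((PySem.List.enumerate list1).foldl
      (fun d (ix : Int × Int) => if d.contains ix.2 = false then d.insert ix.2 ix.1 else d)
      PySem.Dict.empty).keys = PySem.Set.ofList list1 := by
    rw [keys_firstFold, PySem.List.map_snd_enumerate]
    rfl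
  have hnd : ((PySem.List.enumerate list1).foldl
      (fun d (ix : Int × Int) => if d.contains ix.2 = false then d.insert ix.2 ix.1 else d)
      PySem.Dict.empty).keys.Nodup := by
    rw [hkeys]; exact PySem.Set.nodup_ofList list1
  rw [PySem.Dict.items_eq_map_keys _ hnd 0, List.filter_map, List.map_map]
  simp only [Function.comp_def]
  rw [show (fun k : Int => ((k, ((PySem.List.enumerate list1).foldl
        (fun d (ix : Int × Int) => if d.contains ix.2 = false then d.insert ix.2 ix.1 else d)
        PySem.Dict.empty).getD k 0) : Int × Int).1) = (fun k : Int => k) from rfl, List.map_id', hkeys]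
  apply List.filter_congr
  intro k hk
  have hmem : k ∈ list1 := (PySem.Set.mem_ofList list1 k).1 hk
  obtain ⟨j, hj⟩ : ∃ j, lastOcc list1 k = some j := by
    cases h : lastOcc list1 k with
    | none => exact absurd ((lastOcc_eq_none_iff list1 k).1 h) (by simp [hmem])
    | some j => exact ⟨j, rfl⟩
  rw [getD_firstFold list1 0 PySem.Dict.empty k (by rfl) hmem, getD_lastFold list1 0 PySem.Dict.empty k, hj]
  dsimp only
  congr 1
  rw [decide_eq_decide]
  have hiff := first_last_count list1 k j hj
  constructor
  · intro hne
    exact hiff.1 (fun e => hne (by rw [e]))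
  · intro h2 he
    have hne : list1.idxOf k ≠ j := hiff.2 h2
    rw [zero_add, zero_add] at he
    exact hne (by exact_mod_cast he)

theorem twolists_eq_alt (list1 list2 : List Int) :
    twolists list1 list2 = twolists_alt list1 list2 := by
  rw [twolists_eq_canon, twolists_alt_eq_canon]

-- ===== VERDICT (by name: the statement is the Claim_ definition above) =====
theorem twolists_spec : Claim_equal_twolists := by
  intro list1 list2 _
  exact twolists_eq_alt list1 list2
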